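-- pv_equiv track=rewrite | github.com/j3k0/3d-hotel-generator | src/hotel_generator/layout/strategies.py | _default_roles
-- ===== SOURCE A (Python) =====
-- from typing import Sequence
--
-- def _default_roles(num_buildings: int, roles: Sequence[str] | None = None) -> list[str]:
--     """Generate default roles if not specified."""
--     if roles:
--         return list(roles[:num_buildings])
--     if num_buildings == 1:
--         return ["main"]
--     result = ["main"]
--     for i in range(1, num_buildings):
--         if i <= 2:
--             result.append("wing")
--         else:
--             result.append("annex")
--     return result
-- ===== SOURCE B (Python) =====
-- def _default_roles(num_buildings, roles=None):
--     if roles: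
--         return list(roles[:num_buildings])
--     wings = max(0, min(num_buildings - 1, 2))
--     annexes = max(0, num_buildings - 3)
--     return ["main"] + ["wing"] * wings + ["annex"] * annexes
-- ===== Notes on version B (the rewrite author's own statement) =====
-- stated objective: simpler
-- what changed: Replaces the per-index branching loop (and the redundant num_buildings==1 special case) with a closed-form count computation: wings = max(0, min(n-1, 2)), annexes = max(0, n-3), assembled by list multiplication.
import Mathlib
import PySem

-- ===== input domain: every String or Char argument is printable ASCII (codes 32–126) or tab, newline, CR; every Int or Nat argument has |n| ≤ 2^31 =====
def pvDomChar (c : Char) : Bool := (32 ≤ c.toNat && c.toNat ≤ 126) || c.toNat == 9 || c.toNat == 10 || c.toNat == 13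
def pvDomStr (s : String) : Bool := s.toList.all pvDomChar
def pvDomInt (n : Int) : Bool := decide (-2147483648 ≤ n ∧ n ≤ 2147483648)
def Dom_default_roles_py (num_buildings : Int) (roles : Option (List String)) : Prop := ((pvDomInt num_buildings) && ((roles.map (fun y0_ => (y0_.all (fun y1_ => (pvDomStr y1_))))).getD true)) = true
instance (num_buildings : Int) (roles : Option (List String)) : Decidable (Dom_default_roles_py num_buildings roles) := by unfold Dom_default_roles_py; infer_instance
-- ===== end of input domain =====

-- B replaces A's per-index branching loop (and the num_buildings==1 special case)
-- with closed-form role counts assembled by list replication; objective: simpler.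

-- ===== PORT A =====
def default_roles_py (num_buildings : Int) (roles : Option (List String)) : List String :=
  match roles with
  | some rs =>
    if rs ≠ [] then PySem.List.slice rs none (some num_buildings)
    else if num_buildings = 1 then ["main"]
    else List.foldl (fun acc i => if i ≤ 2 then acc ++ ["wing"] else acc ++ ["annex"])
      ["main"] (PySem.List.pyRange 1 num_buildings 1)
  | none =>
    if num_buildings = 1 then ["main"]
    else List.foldl (fun acc i => if i ≤ 2 then acc ++ ["wing"] else acc ++ ["annex"])
      ["main"] (PySem.List.pyRange 1 num_buildings 1)

-- ===== PORT B =====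
def default_roles_py_alt (num_buildings : Int) (roles : Option (List String)) : List String :=
  match roles with
  | some rs =>
    if rs ≠ [] then PySem.List.slice rs none (some num_buildings)
    else ["main"] ++ List.replicate (max 0 (min (num_buildings - 1) 2)).toNat "wing"
                  ++ List.replicate (max 0 (num_buildings - 3)).toNat "annex"
  | none =>
    ["main"] ++ List.replicate (max 0 (min (num_buildings - 1) 2)).toNat "wing"
             ++ List.replicate (max 0 (num_buildings - 3)).toNat "annex"

-- ===== PRECONDITION & SPEC =====
def Spec_default_roles_py (num_buildings : Int) (roles : Option (List String)) (out : List String) : Prop := out = default_roles_py_alt num_buildings roles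
instance (num_buildings : Int) (roles : Option (List String)) (out : List String) : Decidable (Spec_default_roles_py num_buildings roles out) := by unfold Spec_default_roles_py; infer_instance

-- ===== CLAIM (what is proved, stated in full; the proofs are below) =====
def Claim_equal_default_roles_py : Prop := ∀ (num_buildings : Int) (roles : Option (List String)), Dom_default_roles_py num_buildings roles → Spec_default_roles_py num_buildings roles (default_roles_py num_buildings roles)

-- ===== LEMMAS AND PROOFS =====

theorem pv_foldl_app (l : List Int) (acc : List String) :
    List.foldl (fun acc i => if i ≤ 2 then acc ++ ["wing"] else acc ++ ["annex"]) acc l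
      = acc ++ l.map (fun i => if i ≤ 2 then "wing" else "annex") := by
  induction l generalizing acc with
  | nil => simp
  | cons x xs ih => simp [List.foldl, ih]; split <;> simp

theorem pv_map_range (n : Nat) :
    (List.range n).map (fun k : Nat => if ((1:Int) + k) ≤ 2 then "wing" else "annex")
      = List.replicate (min n 2) "wing" ++ List.replicate (n - 2) "annex" := by
  induction n with
  | zero => simp
  | succ n ih =>
    rw [List.range_succ, List.map_append, ih]
    simp only [List.map_cons, List.map_nil]
    by_cases h : n ≤ 1
    · have h1 : ((1:Int) + n) ≤ 2 := by push_cast; omega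
      have h2 : min (n+1) 2 = n + 1 := by omega
      have h3 : min n 2 = n := by omega
      have h4 : n + 1 - 2 = 0 := by omega
      have h5 : n - 2 = 0 := by omega
      simp [h1, h2, h3, h4, h5, List.replicate_succ']
    · have h1 : ¬ ((1:Int) + n) ≤ 2 := by push_cast; omega
      have h2 : min (n+1) 2 = 2 := by omega
      have h3 : min n 2 = 2 := by omega
      have h4 : n + 1 - 2 = (n - 2) + 1 := by omega
      simp [h1, h2, h3, h4, List.replicate_succ']

theorem pv_body (num_buildings : Int) :
    (if num_buildings = 1 then ["main"]
     else List.foldl (fun acc i => if i ≤ 2 then acc ++ ["wing"] else acc ++ ["annex"])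
       ["main"] (PySem.List.pyRange 1 num_buildings 1))
      = ["main"] ++ List.replicate (max 0 (min (num_buildings - 1) 2)).toNat "wing"
                 ++ List.replicate (max 0 (num_buildings - 3)).toNat "annex" := by
  have hrange := PySem.List.pyRange_one 1 num_buildings
  set n : Nat := (num_buildings - 1).toNat with hn
  have hwing : (max 0 (min (num_buildings - 1) 2)).toNat = min n 2 := by omega
  have hannex : (max 0 (num_buildings - 3)).toNat = n - 2 := by omega
  rw [hwing, hannex]
  by_cases h1 : num_buildings = 1
  · have : n = 0 := by omega
    simp [h1, this]
  · simp only [h1, if_false]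
    rw [hrange, pv_foldl_app, List.map_map]
    have : ((fun i => if i ≤ 2 then "wing" else "annex") ∘ fun k : Nat => (1:Int) + k)
        = fun k : Nat => if ((1:Int) + (k:Int)) ≤ 2 then "wing" else "annex" := rfl
    rw [this, pv_map_range]
    simp

-- ===== VERDICT (by name: the statement is the Claim_ definition above) =====
theorem default_roles_py_spec : Claim_equal_default_roles_py := by
  intro num_buildings roles _
  unfold Spec_default_roles_py default_roles_py default_roles_py_alt
  match roles with
  | none => exact pv_body num_buildings
  | some rs =>
    by_cases h : rs = [] <;> simp [h, pv_body num_buildings]
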